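-- pv_equiv track=rewrite | github.com/Chris91ss/UBB-FMI-Computer_Science | Third year/First Semester/Criptografie cu cheie publica/Lab2/exercise5.py | find_numbers_with_totient_value
-- ===== SOURCE A (Python) =====
-- def gcd(a, b):
--     """Compute greatest common divisor using Euclidean algorithm."""
--     while b != 0:
--         a, b = b, a % b
--     return abs(a)
--
-- def euler_totient(n, target_v=None):
--     """
--     Compute Euler's totient function φ(n).
--     φ(n) = number of integers from 1 to n that are coprime to n.
--
--     Args:
--         n: Number to compute totient for
--         target_v: Optional target value for early stopping
--     """
--     if n <= 0:
--         return 0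
--
--     count = 0
--     for i in range(1, n + 1):
--         if gcd(n, i) == 1:
--             count += 1
--             # Early stop: if we already exceed target, no point continuing
--             if target_v is not None and count > target_v:
--                 return count  # Return any value > target_v
--     return count
--
-- def find_numbers_with_totient_value(v, b):
--     """
--     Find all natural numbers less than b that have v as their totient value.
--     """
--     result = []
--
--     # Guard conditions for quick exits
--     if b <= 1:
--         return result  # No natural numbers < 1
--
--     if v < 0:
--         return result  # Totient function is always non-negative
--
--     # Special case: φ(n) = 1 only for n = 1 and n = 2
--     if v == 1:
--         if 1 < b:
--             result.append(1)
--         if 2 < b: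
--             result.append(2)
--         return result
--
--     # φ(n) is even for all n > 2
--     if v > 1 and v % 2 == 1:
--         return result  # No solutions for odd v > 1
--
--     # Check all numbers from 1 to b-1
--     for n in range(1, b):
--         if euler_totient(n, target_v=v) == v:
--             result.append(n)
--
--     return result
-- ===== SOURCE B (Python) =====
-- def find_numbers_with_totient_value(v, b):
--     # phi(n) >= 1 always, phi(n) = 1 only for n in (1, 2), and phi(n) is even for n > 2
--     if v < 0 or (v > 1 and v % 2 == 1):
--         return []
--     if v == 1:
--         return [n for n in (1, 2) if n < b]
--     result = []
--     acc = [0] * max(b, 0)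
--     for n in range(1, b):
--         phi_n = n - acc[n]
--         if phi_n == v:
--             result.append(n)
--         for m in range(2 * n, b, n):
--             acc[m] += phi_n
--     return result
-- ===== Notes on version B (the rewrite author's own statement) =====
-- stated objective: alternative
-- what changed: Keeps A's constant-time quick exits (v<0, odd v>1, v==1) but replaces A's per-number coprime counting (a gcd loop over every i<=n for every n<b) by a single divisor-sum sieve over multiples using the identity that phi(d) summed over the divisors d of n equals n, computing phi of every n<b in one O(b log b) pass; intended as faster (O(b log b) vs O(b^2 log b)) but a timing run could not confirm a ratio because A times out on the sizes where the gap shows.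
import Mathlib
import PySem

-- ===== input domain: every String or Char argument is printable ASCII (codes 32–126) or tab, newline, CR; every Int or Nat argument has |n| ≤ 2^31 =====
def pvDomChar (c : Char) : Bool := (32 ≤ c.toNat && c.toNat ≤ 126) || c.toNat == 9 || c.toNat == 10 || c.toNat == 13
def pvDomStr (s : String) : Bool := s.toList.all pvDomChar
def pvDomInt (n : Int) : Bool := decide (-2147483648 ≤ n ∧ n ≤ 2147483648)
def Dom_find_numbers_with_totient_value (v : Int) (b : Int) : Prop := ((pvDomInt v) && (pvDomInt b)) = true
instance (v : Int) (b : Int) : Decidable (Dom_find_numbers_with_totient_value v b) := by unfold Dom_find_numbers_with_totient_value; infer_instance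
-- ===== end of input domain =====

-- B replaces A's per-number coprime-counting totient by one divisor-sum sieve over multiples
-- (phi(n) = n - sum of phi(d) over proper divisors d, accumulated while walking multiples).

-- ===== PORT A =====
-- while b != 0: a, b = b, a % b; return abs(a)
def gcdA (a b : Int) : Int :=
  if h : b = 0 then |a| else gcdA b (PySem.Int.mod a b)
termination_by b.natAbs
decreasing_by
  rcases lt_or_gt_of_ne h with hb | hb
  · have := PySem.Int.mod_neg_bounds a hb; omega
  · have h1 := PySem.Int.mod_nonneg a hb
    have h2 := PySem.Int.mod_lt a hb
    omega

-- the 'for i in range(1, n+1)' loop of euler_totient, with the early return when count > target_v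
def etLoop (n : Int) (t : Option Int) : List Int → Int → Int
  | [], c => c
  | i :: rest, c =>
    if gcdA n i = 1 then
      match t with
      | some tv => if c + 1 > tv then c + 1 else etLoop n t rest (c + 1)
      | none => etLoop n t rest (c + 1)
    else etLoop n t rest c

def euler_totient (n : Int) (target_v : Option Int) : Int :=
  if n ≤ 0 then 0 else etLoop n target_v (PySem.List.pyRange 1 (n + 1) 1) 0

def find_numbers_with_totient_value (v : Int) (b : Int) : List Int :=
  if b ≤ 1 then []
  else if v < 0 then []
  else if v = 1 then (if 1 < b then [(1 : Int)] else []) ++ (if 2 < b then [(2 : Int)] else [])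
  else if 1 < v ∧ PySem.Int.mod v 2 = 1 then []
  else
    (PySem.List.pyRange 1 b 1).foldl
      (fun res n => if euler_totient n (some v) = v then res ++ [n] else res) []

-- ===== PORT B =====
-- acc[m] += phi_n  for each multiple m of n in range(2*n, b, n)
def innerStep (phin : Int) (a : List Int) (m : Int) : List Int :=
  PySem.List.pySetD a m (PySem.List.pyGetD a m 0 + phin)

-- one iteration of the outer 'for n in range(1, b)' loop, state = (acc, result)
def outerStep (v b : Int) (st : List Int × List Int) (n : Int) : List Int × List Int :=
  let phin := n - PySem.List.pyGetD st.1 n 0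
  ((PySem.List.pyRange (2 * n) b n).foldl (innerStep phin) st.1,
   if phin = v then st.2 ++ [n] else st.2)

def find_numbers_with_totient_value_alt (v : Int) (b : Int) : List Int :=
  if v < 0 ∨ (1 < v ∧ PySem.Int.mod v 2 = 1) then []
  else if v = 1 then [1, 2].filter (fun n => decide (n < b))
  else
    ((PySem.List.pyRange 1 b 1).foldl (outerStep v b)
      (List.replicate (max b 0).toNat 0, [])).2

-- ===== PRECONDITION & SPEC =====
def Spec_find_numbers_with_totient_value (v : Int) (b : Int) (out : List Int) : Prop := out = find_numbers_with_totient_value_alt v b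
instance (v : Int) (b : Int) (out : List Int) : Decidable (Spec_find_numbers_with_totient_value v b out) := by unfold Spec_find_numbers_with_totient_value; infer_instance

-- ===== CLAIM (what is proved, stated in full; the proofs are below) =====
def Claim_equal_find_numbers_with_totient_value : Prop := ∀ (v : Int) (b : Int), Dom_find_numbers_with_totient_value v b → Spec_find_numbers_with_totient_value v b (find_numbers_with_totient_value v b)

-- ===== LEMMAS AND PROOFS =====

-- the common value of both programs: the n in range(1, b) with totient n = v
def targetList (v b : Int) : List Int :=
  (PySem.List.pyRange 1 b 1).filter (fun n => decide ((Nat.totient n.toNat : Int) = v))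

theorem gcdA_natCast : ∀ (k m : Nat), gcdA (m : Int) (k : Int) = (Nat.gcd m k : Int) := by
  intro k
  induction k using Nat.strong_induction_on with
  | _ k ih =>
    intro m
    rw [gcdA]
    by_cases hk : (k : Int) = 0
    · have hk0 : k = 0 := by exact_mod_cast hk
      subst hk0
      simp
    · have hkpos : 0 < k := by omega
      rw [dif_neg hk, PySem.Int.mod_natCast, ih (m % k) (Nat.mod_lt _ hkpos)]
      rw [Nat.gcd_comm k (m % k), ← Nat.gcd_rec, Nat.gcd_comm]

theorem etLoop_iff (n v : Int) : ∀ (l : List Int) (c : Int), c ≤ v →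
    (etLoop n (some v) l c = v ↔
      c + ((l.countP (fun i => decide (gcdA n i = 1)) : Nat) : Int) = v) := by
  intro l
  induction l with
  | nil => intro c _; simp [etLoop]
  | cons i rest ih =>
    intro c hc
    rw [List.countP_cons]
    by_cases hg : gcdA n i = 1
    · simp only [etLoop, if_pos hg]
      by_cases hbig : c + 1 > v
      · rw [if_pos hbig]
        have : (0 : Int) ≤ (rest.countP (fun i => decide (gcdA n i = 1)) : Int) := by positivity
        constructor <;> intro h <;> [omega; (simp [hg] at h; omega)]
      · rw [if_neg hbig, ih (c + 1) (by omega)]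
        simp [hg]; omega
    · simp only [etLoop, if_neg hg, ih c hc]
      simp [hg]

theorem shift_countP (m : Nat) :
    (List.range m).countP (fun k => decide (Nat.gcd m (1 + k) = 1)) =
    (List.range m).countP (fun k => decide (Nat.gcd m k = 1)) := by
  set p : Nat → Bool := fun k => decide (Nat.gcd m k = 1) with hp
  have h1 : (List.range (m + 1)).countP p = (List.range m).countP p + (if p m then 1 else 0) := by
    rw [List.range_succ, List.countP_append]; simp [List.countP_cons]
  have h2 : (List.range (m + 1)).countP p =
      (if p 0 then 1 else 0) + (List.range m).countP (fun k => p (k + 1)) := by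
    rw [List.range_succ_eq_map, List.countP_cons, List.countP_map]
    have hc : (p ∘ Nat.succ) = fun k => p (k + 1) := rfl
    rw [hc]
    omega
  have hpm : p m = p 0 := by simp [hp, Nat.gcd_self, Nat.gcd_zero_right]
  have hpred : (fun k => decide (Nat.gcd m (1 + k) = 1)) = fun k => p (k + 1) := by
    funext k; simp [hp, Nat.add_comm]
  rw [hpm] at h1
  rw [hpred]
  omega

theorem countP_coprime (m : Nat) :
    (PySem.List.pyRange 1 ((m : Int) + 1) 1).countP (fun i => decide (gcdA (m : Int) i = 1)) =
      m.totient := by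
  rw [PySem.List.pyRange_one]
  have : ((m : Int) + 1 - 1).toNat = m := by omega
  rw [this, List.countP_map]
  have hpred : ((fun i => decide (gcdA (m : Int) i = 1)) ∘ fun k : Nat => (1 : Int) + (k : Int)) =
      fun k : Nat => decide (Nat.gcd m (1 + k) = 1) := by
    funext k
    have hcast : (1 : Int) + (k : Int) = ((1 + k : Nat) : Int) := by push_cast; ring
    simp only [Function.comp, hcast, gcdA_natCast]
    simp
  rw [hpred, shift_countP]
  rw [Nat.totient_eq_card_coprime, ← Nat.count_eq_card_filter_range, Nat.count]

theorem et_iff (v : Int) (hv : 0 ≤ v) (n : Int) (hn : 1 ≤ n) :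
    (euler_totient n (some v) = v) ↔ ((Nat.totient n.toNat : Int) = v) := by
  obtain ⟨m, rfl⟩ : ∃ m : Nat, n = (m : Int) := ⟨n.toNat, by omega⟩
  rw [euler_totient, if_neg (by omega), etLoop_iff _ _ _ 0 hv, countP_coprime]
  simp

theorem totient_ge_two {j : Nat} (h3 : 3 ≤ j) : 2 ≤ j.totient := by
  have hpos : 0 < j.totient := Nat.totient_pos.mpr (by omega)
  by_contra hlt
  have h1 : j.totient = 1 := by omega
  rcases Nat.totient_eq_one_iff.mp h1 with rfl | rfl <;> omega

theorem target_empty_neg (v b : Int) (hv : v < 0) : targetList v b = [] := by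
  rw [targetList, List.filter_eq_nil_iff]
  intro n hn
  have hn1 : 1 ≤ n := (PySem.List.mem_pyRange_one.mp hn).1
  have : 0 < n.toNat.totient := Nat.totient_pos.mpr (by omega)
  simp only [decide_eq_true_eq]
  omega

theorem target_empty_odd (v b : Int) (h1 : 1 < v) (h2 : PySem.Int.mod v 2 = 1) :
    targetList v b = [] := by
  rw [targetList, List.filter_eq_nil_iff]
  intro n hn
  have hn1 : 1 ≤ n := (PySem.List.mem_pyRange_one.mp hn).1
  simp only [decide_eq_true_eq]
  intro heq
  have hvmod : v % 2 = 1 := by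
    have := PySem.Int.mod_eq_emod_of_pos (a := v) (b := 2) (by omega)
    omega
  by_cases hsm : n.toNat ≤ 2
  · have hge : 1 ≤ n.toNat := by omega
    have h1' : n.toNat.totient = 1 := by
      interval_cases h : n.toNat <;> decide
    omega
  · have heven : Even n.toNat.totient := Nat.totient_even (by omega)
    obtain ⟨r, hr⟩ := heven
    omega

theorem target_one (b : Int) : targetList 1 b = [1, 2].filter (fun n => decide (n < b)) := by
  by_cases hb : b ≤ 1
  · rw [targetList, PySem.List.pyRange_one_eq_nil hb]
    simp [show ¬(1 : Int) < b by omega, show ¬(2 : Int) < b by omega]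
  by_cases hb3 : b < 3
  · have hb2 : b = 2 := by omega
    subst hb2; decide
  · rw [targetList, PySem.List.pyRange_one_append 1 3 b (by omega) (by omega), List.filter_append]
    have h13 : PySem.List.pyRange 1 3 1 = [1, 2] := by decide
    rw [h13]
    have htail : (PySem.List.pyRange 3 b 1).filter
        (fun n => decide ((Nat.totient n.toNat : Int) = 1)) = [] := by
      rw [List.filter_eq_nil_iff]
      intro n hn
      have hn3 : 3 ≤ n := (PySem.List.mem_pyRange_one.mp hn).1
      have := totient_ge_two (j := n.toNat) (by omega)
      simp only [decide_eq_true_eq]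
      omega
    rw [htail]
    simp [show (1 : Int) < b by omega, show (2 : Int) < b by omega]

theorem A_eq_target (v b : Int) : find_numbers_with_totient_value v b = targetList v b := by
  rw [find_numbers_with_totient_value]
  by_cases hb : b ≤ 1
  · rw [if_pos hb, targetList, PySem.List.pyRange_one_eq_nil hb, List.filter_nil]
  rw [if_neg hb]
  by_cases hv : v < 0
  · rw [if_pos hv, target_empty_neg v b hv]
  rw [if_neg hv]
  by_cases hv1 : v = 1
  · subst hv1
    rw [if_pos rfl, target_one]
    by_cases h1b : (1 : Int) < b <;> by_cases h2b : (2 : Int) < b <;>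
      simp [List.filter, h1b, h2b]
  rw [if_neg hv1]
  by_cases hodd : 1 < v ∧ PySem.Int.mod v 2 = 1
  · rw [if_pos hodd, target_empty_odd v b hodd.1 hodd.2]
  · rw [if_neg hodd, PySem.List.foldl_append_ite_eq_filter, List.nil_append, targetList]
    apply List.filter_congr
    intro n hn
    have hn1 : 1 ≤ n := (PySem.List.mem_pyRange_one.mp hn).1
    exact decide_eq_decide.mpr (et_iff v (by omega) n hn1)

-- ===== B side =====

-- sum of totients of the divisors of j that are ≤ m (what acc[j] holds after sieving 1..m)
def DS (m j : Nat) : Int :=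
  ∑ d ∈ (Finset.range (m + 1)).filter (· ∣ j), (Nat.totient d : Int)

theorem DS_zero (j : Nat) (hj : 0 < j) : DS 0 j = 0 := by
  have : (Finset.range 1).filter (· ∣ j) = ∅ := by
    ext d; simp
    rintro rfl h; omega
  rw [DS, this, Finset.sum_empty]

theorem DS_succ (m j : Nat) :
    DS (m + 1) j = DS m j + (if (m + 1) ∣ j then (Nat.totient (m + 1) : Int) else 0) := by
  rw [DS, DS, Finset.range_add_one, Finset.filter_insert]
  split
  · rw [Finset.sum_insert (by simp)]; ring
  · ring

theorem DS_self (m : Nat) : DS m (m + 1) = ((m + 1 : Nat) : Int) - (Nat.totient (m + 1) : Int) := by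
  have hset : (Finset.range (m + 1)).filter (· ∣ (m + 1)) = (m + 1).properDivisors := by
    ext d
    simp [Nat.mem_properDivisors, and_comm]
  rw [DS, hset]
  have hsum : Nat.totient (m + 1) + ∑ d ∈ (m + 1).properDivisors, Nat.totient d = m + 1 := by
    have := Nat.sum_totient (m + 1)
    rw [← Nat.cons_self_properDivisors (Nat.succ_ne_zero m), Finset.sum_cons] at this
    exact this
  have : ((∑ d ∈ (m + 1).properDivisors, Nat.totient d : Nat) : Int) =
      ∑ d ∈ (m + 1).properDivisors, (Nat.totient d : Int) := by push_cast; rfl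
  omega

theorem inner_len (c : Int) : ∀ (L : List Int) (a : List Int),
    (L.foldl (innerStep c) a).length = a.length := by
  intro L
  induction L with
  | nil => intro a; rfl
  | cons x L' ih =>
    intro a
    rw [List.foldl_cons, ih, innerStep, PySem.List.length_pySetD]

theorem nodup_pyRange_pos (a b s : Int) (hs : 0 < s) : (PySem.List.pyRange a b s).Nodup := by
  rw [PySem.List.pyRange_of_pos a b hs]
  apply List.Nodup.map _ (List.nodup_range)
  intro x y hxy
  simp only at hxy
  have : (x : Int) = y := by
    have hne : s ≠ 0 := by omega
    nlinarith [hxy]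
  exact_mod_cast this

theorem inner_get (c : Int) : ∀ (L : List Int) (a : List Int) (j : Nat),
    (∀ x ∈ L, 0 ≤ x ∧ x.toNat < a.length) → L.Nodup →
    PySem.List.pyGetD (L.foldl (innerStep c) a) (j : Int) 0 =
      PySem.List.pyGetD a (j : Int) 0 + (if (j : Int) ∈ L then c else 0) := by
  intro L
  induction L with
  | nil => intro a j _ _; simp
  | cons x L' ih =>
    intro a j hbnd hnd
    obtain ⟨hx0, hxlen⟩ := hbnd x (by simp)
    have hxcast : x = ((x.toNat : Nat) : Int) := by omega
    have hlen1 : (innerStep c a x).length = a.length := by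
      rw [innerStep, PySem.List.length_pySetD]
    rw [List.foldl_cons, ih (innerStep c a x) j
      (fun y hy => by rw [hlen1]; exact hbnd y (by simp [hy]))
      (List.Nodup.of_cons hnd)]
    have hget : PySem.List.pyGetD (innerStep c a x) (j : Int) 0 =
        if j = x.toNat then PySem.List.pyGetD a x 0 + c else PySem.List.pyGetD a (j : Int) 0 := by
      rw [innerStep, hxcast, PySem.List.pyGetD_pySetD_natCast a x.toNat j _ _ hxlen,
        Int.toNat_natCast]
    rw [hget]
    by_cases hjx : j = x.toNat
    · have hjex : (j : Int) = x := by omega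
      have hnotin : (j : Int) ∉ L' := by
        rw [hjex]; exact (List.nodup_cons.mp hnd).1
      have hin : (j : Int) ∈ x :: L' := by simp [hjex]
      rw [if_pos hjx, if_neg hnotin, if_pos hin, ← hjex]
      omega
    · have hjex : (j : Int) ≠ x := by omega
      have hiff : ((j : Int) ∈ x :: L') ↔ ((j : Int) ∈ L') := by simp [hjex]
      rw [if_neg hjx, if_congr hiff rfl rfl]

-- state of B's sieve after the outer loop has processed n = 1 .. u-1
def bFold (v b u : Int) : List Int × List Int :=
  (PySem.List.pyRange 1 u 1).foldl (outerStep v b) (List.replicate (max b 0).toNat 0, [])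

theorem outer_inv (v b : Int) : ∀ (m : Nat), (m : Int) < b →
    (bFold v b ((m : Int) + 1)).1.length = (max b 0).toNat ∧
    (∀ j : Nat, m < j → (j : Int) < b →
      PySem.List.pyGetD (bFold v b ((m : Int) + 1)).1 (j : Int) 0 = DS m j) ∧
    (bFold v b ((m : Int) + 1)).2 = (PySem.List.pyRange 1 ((m : Int) + 1) 1).filter
      (fun n => decide ((Nat.totient n.toNat : Int) = v)) := by
  intro m
  induction m with
  | zero =>
    intro _
    rw [bFold, PySem.List.pyRange_one_eq_nil (by omega)]
    refine ⟨by simp, fun j hj hjb => ?_, by simp⟩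
    rw [DS_zero j hj]
    simp only [List.foldl_nil, PySem.List.pyGetD_natCast]
    by_cases hlt : j < (max b 0).toNat
    · rw [List.getD_replicate _ hlt]
    · rw [List.getD_eq_default _ _ (by rw [List.length_replicate]; omega)]
  | succ m ih =>
    intro hm
    obtain ⟨ihlen, ihget, ihres⟩ := ih (by omega)
    have hb0 : max b 0 = b := max_eq_left (by omega)
    have hsplit : PySem.List.pyRange 1 (((m + 1 : Nat) : Int) + 1) 1 =
        PySem.List.pyRange 1 ((m : Int) + 1) 1 ++ [(m : Int) + 1] := by
      have : ((m + 1 : Nat) : Int) + 1 = ((m : Int) + 1) + 1 := by push_cast; ring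
      rw [this, PySem.List.pyRange_one_succ_right (by omega)]
    have hfold : bFold v b (((m + 1 : Nat) : Int) + 1) =
        outerStep v b (bFold v b ((m : Int) + 1)) ((m : Int) + 1) := by
      rw [bFold, hsplit, List.foldl_append, List.foldl_cons, List.foldl_nil]; rfl
    set st := bFold v b ((m : Int) + 1) with hst
    have hgetn : PySem.List.pyGetD st.1 ((m : Int) + 1) 0 = DS m (m + 1) := by
      have := ihget (m + 1) (by omega) (by push_cast; omega)
      have hcast : ((m + 1 : Nat) : Int) = (m : Int) + 1 := by push_cast; ring
      rw [hcast] at this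
      exact this
    have hphin : ((m : Int) + 1) - PySem.List.pyGetD st.1 ((m : Int) + 1) 0 =
        (Nat.totient (m + 1) : Int) := by
      rw [hgetn, DS_self]; push_cast; ring
    have hnpos : (0 : Int) < (m : Int) + 1 := by omega
    refine ⟨?_, ?_, ?_⟩
    · rw [hfold, outerStep]
      simp only
      rw [inner_len, ihlen]
    · intro j hj hjb
      rw [hfold, outerStep]
      simp only
      rw [hphin]
      have hbnd : ∀ x ∈ PySem.List.pyRange (2 * ((m : Int) + 1)) b ((m : Int) + 1),
          0 ≤ x ∧ x.toNat < st.1.length := by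
        intro x hx
        obtain ⟨hx1, hx2, _⟩ := (PySem.List.mem_pyRange_iff_of_pos hnpos x).mp hx
        refine ⟨by omega, ?_⟩
        rw [ihlen, hb0]
        omega
      rw [inner_get _ _ _ _ hbnd (nodup_pyRange_pos _ _ _ hnpos),
        ihget j (by omega) hjb]
      have hmem : ((j : Int) ∈ PySem.List.pyRange (2 * ((m : Int) + 1)) b ((m : Int) + 1)) ↔
          (m + 1) ∣ j := by
        rw [PySem.List.mem_pyRange_iff_of_pos hnpos]
        constructor
        · rintro ⟨h1, h2, d, hd⟩
          have hd0 : 0 ≤ d := by nlinarith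
          have hdt : ((d.toNat : Nat) : Int) = d := by omega
          refine ⟨d.toNat + 2, ?_⟩
          have hj' : ((j : Nat) : Int) = (((m + 1) * (d.toNat + 2) : Nat) : Int) := by
            push_cast [hdt]
            linear_combination hd
          exact_mod_cast hj'
        · rintro ⟨k, hk⟩
          have hk2 : 2 ≤ k := by
            rcases Nat.lt_or_ge k 2 with hk' | hk'
            · interval_cases k <;> omega
            · exact hk'
          have hle : (m + 1) * 2 ≤ j := by
            rw [hk]; exact Nat.mul_le_mul_left _ hk2
          refine ⟨by omega, by omega, ⟨(k : Int) - 2, ?_⟩⟩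
          push_cast [hk]; ring
      rw [DS_succ]
      by_cases hdvd : (m + 1) ∣ j
      · rw [if_pos (hmem.mpr hdvd), if_pos hdvd]
      · rw [if_neg (fun h => hdvd (hmem.mp h)), if_neg hdvd]
    · rw [hfold, outerStep]
      simp only
      rw [hphin, ihres, hsplit, List.filter_append]
      have hcast : ((((m : Int) + 1)).toNat) = m + 1 := by omega
      simp only [List.filter_cons, List.filter_nil, hcast]
      by_cases hq : (Nat.totient (m + 1) : Int) = v
      · simp [hq]
      · simp [hq]

theorem sieve_eq_target (v b : Int) :
    ((PySem.List.pyRange 1 b 1).foldl (outerStep v b)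
      (List.replicate (max b 0).toNat 0, [])).2 = targetList v b := by
  by_cases hb : b ≤ 1
  · rw [targetList, PySem.List.pyRange_one_eq_nil hb]
    rfl
  · have hb' : ((b - 1).toNat : Int) + 1 = b := by omega
    have := (outer_inv v b (b - 1).toNat (by omega)).2.2
    rw [hb'] at this
    rw [targetList, ← this]
    rfl

theorem B_eq_target (v b : Int) : find_numbers_with_totient_value_alt v b = targetList v b := by
  rw [find_numbers_with_totient_value_alt]
  by_cases hg : v < 0 ∨ (1 < v ∧ PySem.Int.mod v 2 = 1)
  · rw [if_pos hg]
    rcases hg with hv | ⟨h1, h2⟩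
    · rw [target_empty_neg v b hv]
    · rw [target_empty_odd v b h1 h2]
  rw [if_neg hg]
  by_cases hv1 : v = 1
  · subst hv1
    rw [if_pos rfl, target_one]
  · rw [if_neg hv1, sieve_eq_target]

-- ===== VERDICT (by name: the statement is the Claim_ definition above) =====
theorem find_numbers_with_totient_value_spec : Claim_equal_find_numbers_with_totient_value := by
  intro v b _
  unfold Spec_find_numbers_with_totient_value
  rw [A_eq_target, B_eq_target]
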